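-- pv_equiv track=rewrite | github.com/Lycorisophy/agent-ruyi72-desktop-pygui | src/service/output_review_sync.py | _iter_non_code_spans
-- ===== SOURCE A (Python) =====
-- def _iter_non_code_spans(text: str) -> list[tuple[int, int]]:
--     """返回非 ``` fenced 块内的 (char_start, char_end) 半开区间。"""
--     spans: list[tuple[int, int]] = []
--     i = 0
--     n = len(text)
--     fence = "```"
--     while i < n:
--         j = text.find(fence, i)
--         if j < 0:
--             spans.append((i, n))
--             break
--         if j > i:
--             spans.append((i, j))
--         close = text.find(fence, j + 3)
--         if close < 0:
--             i = n
--             break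
--         i = close + len(fence)
--         while i < n and text[i] in "\r\n":
--             i += 1
--     return spans
-- ===== SOURCE B (Python) =====
-- def _iter_non_code_spans(text: str) -> list[tuple[int, int]]:
--     """Two-pass complement: collect all fence positions first, then emit the gaps."""
--     fence = "```"
--     n = len(text)
--     # pass 1: every non-overlapping occurrence of ``` in the text
--     fences = []
--     i = 0
--     while i <= n:
--         j = text.find(fence, i)
--         if j < 0:
--             break
--         fences.append(j)
--         i = j + 3
--     # pass 2: the gaps around consecutive fence pairs
--     spans = []
--     cursor = 0
--     while len(fences) >= 2:
--         start, close = fences[0], fences[1]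
--         if cursor < start:
--             spans.append((cursor, start))
--         cursor = close + 3
--         while cursor < n and text[cursor] in "\r\n":
--             cursor += 1
--         fences = fences[2:]
--     if fences:  # unclosed fence: keep the gap before it, drop the rest
--         if cursor < fences[0]:
--             spans.append((cursor, fences[0]))
--     elif cursor < n:
--         spans.append((cursor, n))
--     return spans
-- ===== Notes on version B (the rewrite author's own statement) =====
-- stated objective: alternative
-- what changed: A interleaves finding fences and emitting spans in one stateful scan; B first collects all non-overlapping fence positions in one pass, then emits the non-code gaps as the complement of consecutive fence pairs in a second pass.
import Mathlib
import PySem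

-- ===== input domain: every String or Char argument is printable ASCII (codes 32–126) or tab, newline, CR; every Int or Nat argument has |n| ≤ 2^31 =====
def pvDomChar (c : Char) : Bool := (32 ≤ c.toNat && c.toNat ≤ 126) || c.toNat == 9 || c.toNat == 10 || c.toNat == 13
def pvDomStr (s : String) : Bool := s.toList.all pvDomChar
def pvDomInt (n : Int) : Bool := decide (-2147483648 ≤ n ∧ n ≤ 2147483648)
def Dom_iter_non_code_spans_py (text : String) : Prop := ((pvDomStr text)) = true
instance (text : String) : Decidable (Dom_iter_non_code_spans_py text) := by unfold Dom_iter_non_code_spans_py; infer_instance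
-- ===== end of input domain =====

-- B replaces A's single interleaved scan by two passes (collect all fence positions, then emit the
-- complement gaps); same O(n) cost, return value proved identical on all inputs.

-- the fence "```"
def pvFence : List Char := ['`', '`', '`']

-- shared inner loop of both Pythons: `while i < n and text[i] in "\r\n": i += 1`
def pvSkipNl (t : List Char) (i : Nat) : Nat :=
  if h : i < t.length then
    if t[i] = '\r' ∨ t[i] = '\n' then pvSkipNl t (i + 1) else i
  else i
termination_by t.length - i
decreasing_by exact Nat.sub_succ_lt_self _ _ h

-- facts the ports' own termination proofs cite by name
theorem pvSkipNl_ge (t : List Char) (i : Nat) : i ≤ pvSkipNl t i := by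
  rw [pvSkipNl]
  split_ifs with h hnl
  · exact le_trans (Nat.le_succ i) (pvSkipNl_ge t (i + 1))
  · exact le_refl i
  · exact le_refl i
termination_by t.length - i
decreasing_by exact Nat.sub_succ_lt_self _ _ h

theorem fence_prefix_bound {t : List Char} {k : Nat} (h : pvFence <+: t.drop k) :
    k + 3 ≤ t.length := by
  have h1 := h.length_le
  rw [List.length_drop] at h1
  have h2 : pvFence.length = 3 := rfl
  omega

-- ===== PORT A =====
-- A's while-loop: find the next fence from i, emit the gap before it, find its close, skip \r\n.
-- Python's local names j / close are inlined as their defining expressions (same values).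
theorem pvNotNeg_ne_negOne {j : Int} (hj : ¬ j < 0) : j ≠ -1 :=
  fun h => hj (h ▸ (by decide : (-1 : Int) < 0))

theorem pvFindFrom_facts (t : List Char) (i : Nat) (hle : i ≤ t.length)
    (hj : ¬ PySem.Chars.findFrom t pvFence (i : Int) none < 0) :
    i ≤ (PySem.Chars.findFrom t pvFence (i : Int) none).toNat ∧
    (PySem.Chars.findFrom t pvFence (i : Int) none).toNat + 3 ≤ t.length := by
  obtain ⟨h1, h2, -⟩ :=
    PySem.Chars.findFrom_natCast_spec t pvFence i hle (pvNotNeg_ne_negOne hj)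
  exact ⟨by simpa using Int.toNat_le_toNat h1, fence_prefix_bound h2⟩

theorem pvLoopA_dec (t : List Char) (i : Nat) (hi : i < t.length)
    (hj : ¬ PySem.Chars.findFrom t pvFence (i : Int) none < 0)
    (hc : ¬ PySem.Chars.findFrom t pvFence
      (((PySem.Chars.findFrom t pvFence (i : Int) none).toNat + 3 : Nat) : Int) none < 0) :
    t.length - pvSkipNl t ((PySem.Chars.findFrom t pvFence
      (((PySem.Chars.findFrom t pvFence (i : Int) none).toNat + 3 : Nat) : Int) none).toNat + 3)
      < t.length - i :=
  have hA := pvFindFrom_facts t i (Nat.le_of_lt hi) hj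
  have hB := pvFindFrom_facts t ((PySem.Chars.findFrom t pvFence (i : Int) none).toNat + 3) hA.2 hc
  have hge := pvSkipNl_ge t ((PySem.Chars.findFrom t pvFence
    (((PySem.Chars.findFrom t pvFence (i : Int) none).toNat + 3 : Nat) : Int) none).toNat + 3)
  Nat.sub_lt_sub_left
    (lt_of_le_of_lt hA.1 (lt_of_lt_of_le (Nat.lt_add_of_pos_right (by decide)) hA.2))
    (lt_of_le_of_lt hA.1 (lt_of_lt_of_le (Nat.lt_add_of_pos_right (by decide))
      (le_trans hB.1 (le_trans (Nat.le_add_right _ 3) hge))))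

theorem pvFenceLoop_dec (t : List Char) (i : Nat) (hle : i ≤ t.length)
    (hj : ¬ PySem.Chars.findFrom t pvFence (i : Int) none < 0) :
    t.length - ((PySem.Chars.findFrom t pvFence (i : Int) none).toNat + 3) < t.length - i :=
  have hA := pvFindFrom_facts t i hle hj
  Nat.sub_lt_sub_left
    (lt_of_le_of_lt hA.1 (lt_of_lt_of_le (Nat.lt_add_of_pos_right (by decide)) hA.2))
    (lt_of_le_of_lt hA.1 (Nat.lt_add_of_pos_right (by decide)))

def pvLoopA (t : List Char) (i : Nat) (spans : List (Int × Int)) : List (Int × Int) :=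
  if hi : i < t.length then
    if hj : PySem.Chars.findFrom t pvFence (i : Int) none < 0 then
      spans ++ [((i : Int), (t.length : Int))]
    else
      if hc : PySem.Chars.findFrom t pvFence
          (((PySem.Chars.findFrom t pvFence (i : Int) none).toNat + 3 : Nat) : Int) none < 0 then
        if (i : Int) < PySem.Chars.findFrom t pvFence (i : Int) none then
          spans ++ [((i : Int), PySem.Chars.findFrom t pvFence (i : Int) none)]
        else spans
      else
        pvLoopA t
          (pvSkipNl t ((PySem.Chars.findFrom t pvFence
            (((PySem.Chars.findFrom t pvFence (i : Int) none).toNat + 3 : Nat) : Int) none).toNat + 3))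
          (if (i : Int) < PySem.Chars.findFrom t pvFence (i : Int) none then
            spans ++ [((i : Int), PySem.Chars.findFrom t pvFence (i : Int) none)]
          else spans)
  else spans
termination_by t.length - i
decreasing_by exact pvLoopA_dec t i hi hj hc

def iter_non_code_spans_py (text : String) : List (Int × Int) :=
  pvLoopA text.toList 0 []

-- ===== PORT B =====
-- pass 1 of B: every non-overlapping occurrence of the fence, searching from index i
-- (the `i ≤ t.length` guard mirrors Source B's `while i <= n` and only makes the recursion total)
def pvFenceLoop (t : List Char) (i : Nat) : List Int :=
  if hle : i ≤ t.length then
    if hj : PySem.Chars.findFrom t pvFence (i : Int) none < 0 then []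
    else
      PySem.Chars.findFrom t pvFence (i : Int) none ::
        pvFenceLoop t ((PySem.Chars.findFrom t pvFence (i : Int) none).toNat + 3)
  else []
termination_by t.length - i
decreasing_by exact pvFenceLoop_dec t i hle hj

-- pass 2 of B: walk the fence list two at a time, emitting the nonempty gaps
def pvPass2 (t : List Char) (cursor : Nat) : List Int → List (Int × Int)
  | start :: close :: rest =>
      (if (cursor : Int) < start then [((cursor : Int), start)] else []) ++
      pvPass2 t (pvSkipNl t (close.toNat + 3)) rest
  | [p] => if (cursor : Int) < p then [((cursor : Int), p)] else []
  | [] => if cursor < t.length then [((cursor : Int), (t.length : Int))] else []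

def iter_non_code_spans_py_alt (text : String) : List (Int × Int) :=
  pvPass2 text.toList 0 (pvFenceLoop text.toList 0)

-- ===== PRECONDITION & SPEC =====
def Spec_iter_non_code_spans_py (text : String) (out : List (Int × Int)) : Prop := out = iter_non_code_spans_py_alt text
instance (text : String) (out : List (Int × Int)) : Decidable (Spec_iter_non_code_spans_py text out) := by unfold Spec_iter_non_code_spans_py; infer_instance

-- ===== CLAIM (what is proved, stated in full; the proofs are below) =====
def Claim_equal_iter_non_code_spans_py : Prop := ∀ (text : String), Dom_iter_non_code_spans_py text → Spec_iter_non_code_spans_py text (iter_non_code_spans_py text)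

-- ===== LEMMAS AND PROOFS =====

theorem fence_prefix_head {t : List Char} {k : Nat} (hk : k < t.length)
    (h : pvFence <+: t.drop k) : t[k] = '`' := by
  have h0 : (t.drop k)[0]'(by
    have := h.length_le
    simp [List.length_drop] at this ⊢
    omega) = '`' := by
    obtain ⟨u, hu⟩ := h
    simp [← hu, pvFence]
  simpa using h0

-- find points at the FIRST occurrence, so a witness with minimality pins its value
theorem find_eq_of {s sub : List Char} {k : Nat} (hpre : sub <+: s.drop k)
    (hmin : ∀ l, l < k → ¬ sub <+: s.drop l) : PySem.Chars.find s sub = (k : Int) := by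
  have hin : PySem.Chars.isIn sub s = true :=
    (PySem.Chars.exists_prefix_drop_iff_isIn sub s).mp ⟨k, hpre⟩
  have hnn : 0 ≤ PySem.Chars.find s sub :=
    (PySem.Chars.find_nonneg_iff s sub).mpr ((PySem.Chars.isIn_iff_infix sub s).mp hin)
  obtain ⟨hp, hm⟩ := PySem.Chars.find_spec hnn
  have h1 : ¬ ((PySem.Chars.find s sub).toNat < k) := fun h => hmin _ h hp
  have h2 : ¬ (k < (PySem.Chars.find s sub).toNat) := fun h => hm k h hpre
  omega

theorem pvSkipNl_le (t : List Char) (i : Nat) (hle : i ≤ t.length) :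
    pvSkipNl t i ≤ t.length := by
  rw [pvSkipNl]
  split_ifs with h hnl
  · exact pvSkipNl_le t (i + 1) (by omega)
  · exact hle
  · exact hle
termination_by t.length - i
decreasing_by exact Nat.sub_succ_lt_self _ _ h

theorem findFrom_at_length (t : List Char) :
    PySem.Chars.findFrom t pvFence ((t.length : Nat) : Int) none = -1 := by
  rw [PySem.Chars.findFrom_natCast_eq_neg_one_iff t pvFence t.length le_rfl]
  simp [List.drop_length, pvFence]

-- searching from i+1 finds the same fence when no fence starts at i
theorem findFrom_succ (t : List Char) (i : Nat) (hi : i < t.length)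
    (h : ¬ pvFence <+: t.drop i) :
    PySem.Chars.findFrom t pvFence ((i + 1 : Nat) : Int) none
      = PySem.Chars.findFrom t pvFence ((i : Nat) : Int) none := by
  rw [PySem.Chars.findFrom_natCast t pvFence (i + 1) (by omega),
      PySem.Chars.findFrom_natCast t pvFence i (by omega)]
  by_cases h1 : PySem.Chars.find (t.drop (i + 1)) pvFence = -1
  · have h0 : PySem.Chars.find (t.drop i) pvFence = -1 := by
      rw [PySem.Chars.find_eq_neg_one_iff]
      intro hinf
      have hin := (PySem.Chars.isIn_iff_infix pvFence (t.drop i)).mpr hinf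
      obtain ⟨j, hj⟩ := (PySem.Chars.exists_prefix_drop_iff_isIn pvFence (t.drop i)).mpr hin
      rcases Nat.eq_zero_or_pos j with hj0 | hjpos
      · exact h (by simpa [hj0] using hj)
      · have : pvFence <+: (t.drop (i + 1)).drop (j - 1) := by
          rw [List.drop_drop] at hj ⊢
          rw [show i + 1 + (j - 1) = i + j from by omega]; exact hj
        have hinf1 : pvFence <:+: t.drop (i + 1) :=
          (PySem.Chars.isIn_iff_infix _ _).mp
            ((PySem.Chars.exists_prefix_drop_iff_isIn _ _).mp ⟨j - 1, this⟩)
        exact (PySem.Chars.find_eq_neg_one_iff _ _).mp h1 hinf1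
    simp [h0, h1]
  · have hnn : 0 ≤ PySem.Chars.find (t.drop (i + 1)) pvFence := by
      have := PySem.Chars.neg_one_le_find (t.drop (i + 1)) pvFence
      omega
    obtain ⟨hp, hm⟩ := PySem.Chars.find_spec hnn
    set m := (PySem.Chars.find (t.drop (i + 1)) pvFence).toNat with hmdef
    have hfind : PySem.Chars.find (t.drop i) pvFence = ((m + 1 : Nat) : Int) := by
      apply find_eq_of
      · rw [List.drop_drop] at hp ⊢
        rw [show i + (m + 1) = i + 1 + m from by omega]; exact hp
      · intro l hl
        rcases Nat.eq_zero_or_pos l with hl0 | hlpos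
        · simpa [hl0] using h
        · intro hpl
          apply hm (l - 1) (by omega)
          rw [List.drop_drop] at hpl ⊢
          rw [show i + 1 + (l - 1) = i + l from by omega]; exact hpl
    rw [hfind]
    have h2 : ¬ ((m + 1 : Nat) : Int) = -1 := by omega
    simp only [h1, h2, if_false]
    push_cast
    omega

-- skipping \r\n (never part of a fence) does not change the next fence found
theorem findFrom_skip (t : List Char) (i : Nat) (hle : i ≤ t.length) :
    PySem.Chars.findFrom t pvFence ((pvSkipNl t i : Nat) : Int) none
      = PySem.Chars.findFrom t pvFence ((i : Nat) : Int) none := by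
  rw [pvSkipNl]
  split_ifs with h hnl
  · rw [findFrom_skip t (i + 1) (by omega)]
    apply findFrom_succ t i h
    intro hpre
    have := fence_prefix_head h hpre
    rcases hnl with h1 | h1 <;> rw [h1] at this <;> exact absurd this (by decide)
  · rfl
  · rfl
termination_by t.length - i
decreasing_by exact Nat.sub_succ_lt_self _ _ h

theorem fenceLoop_skip (t : List Char) (m : Nat) (hle : m ≤ t.length) :
    pvFenceLoop t (pvSkipNl t m) = pvFenceLoop t m := by
  conv_lhs => rw [pvFenceLoop]
  conv_rhs => rw [pvFenceLoop]
  rw [dif_pos (pvSkipNl_le t m hle), dif_pos hle, findFrom_skip t m hle]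

-- the core equivalence: A's scan from i equals the complement of the fence list from i
theorem main_eq (t : List Char) (i : Nat) (spans : List (Int × Int)) (hle : i ≤ t.length) :
    pvLoopA t i spans = spans ++ pvPass2 t i (pvFenceLoop t i) := by
  rw [pvLoopA, pvFenceLoop, dif_pos hle]
  by_cases hi : i < t.length
  · rw [dif_pos hi]
    by_cases hj : PySem.Chars.findFrom t pvFence (i : Int) none < 0
    · rw [dif_pos hj, dif_pos hj]
      simp [pvPass2, hi]
    · rw [dif_neg hj, dif_neg hj]
      obtain ⟨hij, hpre, -⟩ :=
        PySem.Chars.findFrom_natCast_spec t pvFence i (Nat.le_of_lt hi) (by omega)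
      have h3 := fence_prefix_bound hpre
      by_cases hc : PySem.Chars.findFrom t pvFence
          (((PySem.Chars.findFrom t pvFence (i : Int) none).toNat + 3 : Nat) : Int) none < 0
      · rw [dif_pos hc]
        rw [pvFenceLoop, dif_pos (by omega : (PySem.Chars.findFrom t pvFence (i : Int) none).toNat + 3 ≤ t.length), dif_pos hc]
        simp only [pvPass2]
        split_ifs <;> simp
      · rw [dif_neg hc]
        obtain ⟨hcj, hcpre, -⟩ :=
          PySem.Chars.findFrom_natCast_spec t pvFence
            ((PySem.Chars.findFrom t pvFence (i : Int) none).toNat + 3) (by omega) (by omega)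
        have h3c := fence_prefix_bound hcpre
        rw [pvFenceLoop, dif_pos (by omega : (PySem.Chars.findFrom t pvFence (i : Int) none).toNat + 3 ≤ t.length), dif_neg hc]
        simp only [pvPass2]
        rw [main_eq t _ _ (pvSkipNl_le t _ (by omega))]
        rw [fenceLoop_skip t _ (by omega)]
        split_ifs <;> simp
  · rw [dif_neg hi]
    have hieq : i = t.length := by omega
    subst hieq
    rw [dif_pos (by rw [findFrom_at_length]; decide)]
    simp [pvPass2]
termination_by t.length - i
decreasing_by
  obtain ⟨hij, hpre, -⟩ :=
    PySem.Chars.findFrom_natCast_spec t pvFence i (Nat.le_of_lt hi) (by omega)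
  have h3 := fence_prefix_bound hpre
  obtain ⟨hcj2, hcpre2, -⟩ :=
    PySem.Chars.findFrom_natCast_spec t pvFence
      ((PySem.Chars.findFrom t pvFence (i : Int) none).toNat + 3) (by omega) (by omega)
  have h3c := fence_prefix_bound hcpre2
  have hge := pvSkipNl_ge t ((PySem.Chars.findFrom t pvFence
    (((PySem.Chars.findFrom t pvFence (i : Int) none).toNat + 3 : Nat) : Int) none).toNat + 3)
  omega

-- ===== VERDICT (by name: the statement is the Claim_ definition above) =====
theorem iter_non_code_spans_py_spec : Claim_equal_iter_non_code_spans_py := by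
  intro text _
  unfold Spec_iter_non_code_spans_py iter_non_code_spans_py iter_non_code_spans_py_alt
  simpa using main_eq text.toList 0 [] (Nat.zero_le _)
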